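-- pv_equiv track=rewrite | github.com/TheRamsay/aoc-2024 | day6/main.py | check_ahead
-- ===== SOURCE A (Python) =====
-- heh = {"^": 0, ">": 1, "v": 2, "<": 3}
--
-- hah = ["^", ">", "v", "<"]
--
-- dirs = {
--     "^": (0, -1),
--     ">": (1, 0),
--     "v": (0, 1),
--     "<": (-1, 0),
-- }
--
-- def check_ahead(x: int, y: int, grid: list[list[int]], symbol: str, d: int):
--     if d >= 4:
--         raise Exception("XD")
--
--     dx, dy = dirs[symbol]
--     if grid[y + dy][x + dx] != "#":
--         return symbol, dx, dy
--
--     while True: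
--         symbol = hah[(heh[symbol] + 1) % 4]
--         return check_ahead(x, y, grid, symbol, d + 1)
-- ===== SOURCE B (Python) =====
-- heh = {"^": 0, ">": 1, "v": 2, "<": 3}
--
-- hah = ["^", ">", "v", "<"]
--
-- dirs = {
--     "^": (0, -1),
--     ">": (1, 0),
--     "v": (0, 1),
--     "<": (-1, 0),
-- }
--
-- def check_ahead(x: int, y: int, grid: list[list[int]], symbol: str, d: int):
--     # Iterate over the remaining rotation budget instead of recursing:
--     # candidate k-th rotation of the start direction, first free one wins.
--     i = heh[symbol]
--     for k in range(4 - d):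
--         s = hah[(i + k) % 4]
--         dx, dy = dirs[s]
--         if grid[y + dy][x + dx] != "#":
--             return s, dx, dy
--     raise Exception("XD")
-- ===== Notes on version B (the rewrite author's own statement) =====
-- stated objective: simpler
-- what changed: The tail recursion that mutates the symbol step by step is replaced by a single for-loop over the remaining rotation budget range(4-d), indexing the k-th rotation directly as hah[(heh[symbol]+k)%4] and returning the first one not facing '#'.
import Mathlib
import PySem

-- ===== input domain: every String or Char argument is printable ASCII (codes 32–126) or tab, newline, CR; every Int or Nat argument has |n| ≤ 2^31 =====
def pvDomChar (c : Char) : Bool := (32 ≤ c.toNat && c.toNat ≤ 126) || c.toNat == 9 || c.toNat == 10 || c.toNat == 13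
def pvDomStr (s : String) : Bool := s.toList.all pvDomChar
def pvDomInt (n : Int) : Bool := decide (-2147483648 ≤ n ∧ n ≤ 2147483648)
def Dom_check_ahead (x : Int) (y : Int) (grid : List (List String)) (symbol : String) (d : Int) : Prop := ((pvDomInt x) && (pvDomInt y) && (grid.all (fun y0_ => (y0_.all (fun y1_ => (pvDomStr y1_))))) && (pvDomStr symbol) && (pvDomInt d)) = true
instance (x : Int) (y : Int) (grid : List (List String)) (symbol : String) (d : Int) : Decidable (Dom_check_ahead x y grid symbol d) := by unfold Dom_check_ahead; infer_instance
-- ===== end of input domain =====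

-- B replaces A's symbol-mutating tail recursion by one for-loop over the rotation budget (simpler decomposition, same cost).

-- module constants of the Python file
def hehD : PySem.Dict String Int := PySem.Dict.ofList [("^", 0), (">", 1), ("v", 2), ("<", 3)]
def hahL : List String := ["^", ">", "v", "<"]
def dirsD : PySem.Dict String (Int × Int) :=
  PySem.Dict.ofList [("^", (0, -1)), (">", (1, 0)), ("v", (0, 1)), ("<", (-1, 0))]

-- ===== PORT A =====
-- literal port of A; where the Python raises (d >= 4, KeyError, IndexError) the port
-- returns the junk value ("", 0, 0); Pre_check_ahead excludes exactly those inputs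
def check_ahead (x : Int) (y : Int) (grid : List (List String)) (symbol : String) (d : Int) : String × Int × Int :=
  if _h : d ≥ 4 then ("", 0, 0)        -- raise Exception("XD")
  else
    match dirsD.get? symbol with
    | none => ("", 0, 0)               -- KeyError
    | some (dx, dy) =>
      match PySem.List.pyGet? grid (y + dy) with
      | none => ("", 0, 0)             -- IndexError
      | some row =>
        match PySem.List.pyGet? row (x + dx) with
        | none => ("", 0, 0)           -- IndexError
        | some c =>
          if c ≠ "#" then (symbol, dx, dy)
          else
            match hehD.get? symbol with
            | none => ("", 0, 0)       -- KeyError (unreachable: symbol ∈ dirs)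
            | some i =>
              match PySem.List.pyGet? hahL (PySem.Int.mod (i + 1) 4) with
              | none => ("", 0, 0)     -- IndexError (unreachable)
              | some symbol' => check_ahead x y grid symbol' (d + 1)
termination_by (4 - d).toNat
decreasing_by omega

-- ===== PORT B =====
-- the body of B's 'for k in range(4 - d)' loop, k counting up to n = 4 - d
def altGo (x : Int) (y : Int) (grid : List (List String)) (i : Int) (k : Int) (n : Int) : String × Int × Int :=
  if _h : k ≥ n then ("", 0, 0)        -- loop exhausted: raise Exception("XD")
  else
    match PySem.List.pyGet? hahL (PySem.Int.mod (i + k) 4) with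
    | none => ("", 0, 0)               -- IndexError (unreachable)
    | some s =>
      match dirsD.get? s with
      | none => ("", 0, 0)             -- KeyError (unreachable)
      | some (dx, dy) =>
        match PySem.List.pyGet? grid (y + dy) with
        | none => ("", 0, 0)           -- IndexError
        | some row =>
          match PySem.List.pyGet? row (x + dx) with
          | none => ("", 0, 0)         -- IndexError
          | some c =>
            if c ≠ "#" then (s, dx, dy)
            else altGo x y grid i (k + 1) n
termination_by (n - k).toNat
decreasing_by omega

def check_ahead_alt (x : Int) (y : Int) (grid : List (List String)) (symbol : String) (d : Int) : String × Int × Int :=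
  match hehD.get? symbol with
  | none => ("", 0, 0)                 -- KeyError
  | some i => altGo x y grid i 0 (4 - d)

-- ===== PRECONDITION & SPEC =====
-- helpers for the precondition (tables, not computations of either port)
def deltaDir (m : Int) : Int × Int :=
  if PySem.Int.mod m 4 = 0 then (0, -1)
  else if PySem.Int.mod m 4 = 1 then (1, 0)
  else if PySem.Int.mod m 4 = 2 then (0, 1)
  else (-1, 0)

def cellAt (x : Int) (y : Int) (grid : List (List String)) (m : Int) : Option String :=
  (PySem.List.pyGet? grid (y + (deltaDir m).2)).bind (fun row => PySem.List.pyGet? row (x + (deltaDir m).1))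

def hehIdx (symbol : String) : Int := (hehD.get? symbol).getD 0

-- Pre: exactly the inputs on which A returns normally — the guard symbol is one of the
-- four direction symbols, and some k-th rotation (k < 4, reached before the depth bound
-- d + k ≤ 3) looks at an in-range cell that is not "#", all earlier rotations looking at
-- in-range cells equal to "#".
def Pre_check_ahead (x : Int) (y : Int) (grid : List (List String)) (symbol : String) (d : Int) : Prop :=
  symbol ∈ hahL ∧ ∃ k : Nat, k < 4 ∧ d ≤ 3 - (k : Int) ∧
    (∀ j : Nat, j < k → cellAt x y grid (hehIdx symbol + j) = some "#") ∧
    (cellAt x y grid (hehIdx symbol + k)).getD "#" ≠ "#"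
instance (x : Int) (y : Int) (grid : List (List String)) (symbol : String) (d : Int) : Decidable (Pre_check_ahead x y grid symbol d) := by unfold Pre_check_ahead; infer_instance

def pvWitness_check_ahead : Int × Int × List (List String) × String × Int :=
  (1, 1, [[".", ".", "."], [".", "^", "."], [".", ".", "."]], "^", 0)

def Spec_check_ahead (x : Int) (y : Int) (grid : List (List String)) (symbol : String) (d : Int) (out : String × Int × Int) : Prop := out = check_ahead_alt x y grid symbol d
instance (x : Int) (y : Int) (grid : List (List String)) (symbol : String) (d : Int) (out : String × Int × Int) : Decidable (Spec_check_ahead x y grid symbol d out) := by unfold Spec_check_ahead; infer_instance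

-- ===== CLAIM (what is proved, stated in full; the proofs are below) =====
def Claim_equal_check_ahead : Prop := ∀ (x : Int) (y : Int) (grid : List (List String)) (symbol : String) (d : Int), Dom_check_ahead x y grid symbol d → Pre_check_ahead x y grid symbol d → Spec_check_ahead x y grid symbol d (check_ahead x y grid symbol d)

-- ===== LEMMAS AND PROOFS =====

-- the m-th rotation symbol
def symAt (m : Int) : String := (PySem.List.pyGet? hahL (PySem.Int.mod m 4)).getD ""

lemma pymod4 (m : Int) : PySem.Int.mod m 4 = m % 4 :=
  PySem.Int.mod_eq_emod_of_pos (by norm_num)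

lemma emod4_cases (m : Int) : m % 4 = 0 ∨ m % 4 = 1 ∨ m % 4 = 2 ∨ m % 4 = 3 := by omega

lemma heh_symAt (m : Int) : hehD.get? (symAt m) = some (m % 4) := by
  rcases emod4_cases m with h | h | h | h <;> simp only [symAt, pymod4, h] <;> decide

lemma dirs_symAt (m : Int) : dirsD.get? (symAt m) = some ((deltaDir m).1, (deltaDir m).2) := by
  rcases emod4_cases m with h | h | h | h <;> simp only [symAt, deltaDir, pymod4, h] <;> decide

lemma hah_symAt (m : Int) : PySem.List.pyGet? hahL (PySem.Int.mod m 4) = some (symAt m) := by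
  rcases emod4_cases m with h | h | h | h <;> simp only [symAt, pymod4, h] <;> decide

lemma hah_mod_succ (m : Int) :
    PySem.List.pyGet? hahL (PySem.Int.mod (m % 4 + 1) 4) = some (symAt (m + 1)) := by
  have h1 : (m + 1) % 4 = (m % 4 + 1) % 4 := by omega
  simp only [symAt, pymod4]
  rw [h1]
  rcases emod4_cases m with h | h | h | h <;> simp only [pymod4, h] <;> decide

lemma symAt_of_mem (symbol : String) (h : symbol ∈ hahL) : symAt (hehIdx symbol) = symbol := by
  fin_cases h <;> decide

lemma opt_free {o : Option String} (h : o.getD "#" ≠ "#") : ∃ c, o = some c ∧ c ≠ "#" := by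
  cases o <;> simp_all

-- A-side characterization: from symbol = symAt a, depth d, with k rotations blocked then a free cell
lemma checkA_eval (x y : Int) (grid : List (List String)) :
    ∀ (k : Nat) (a d : Int),
      (∀ j : Nat, j < k → cellAt x y grid (a + j) = some "#") →
      (cellAt x y grid (a + k)).getD "#" ≠ "#" →
      d ≤ 3 - (k : Int) →
      check_ahead x y grid (symAt a) d =
        (symAt (a + k), (deltaDir (a + k)).1, (deltaDir (a + k)).2) := by
  intro k
  induction k with
  | zero =>
    intro a d _ hfree hd
    simp only [Nat.cast_zero, add_zero] at hfree ⊢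
    obtain ⟨c, hc, hne⟩ := opt_free hfree
    simp only [cellAt] at hc
    obtain ⟨row, hrow, hcell⟩ := Option.bind_eq_some_iff.mp hc
    rw [check_ahead, dif_neg (by omega : ¬ d ≥ 4)]
    simp only [dirs_symAt a, hrow, hcell]
    simp [hne]
  | succ k ih =>
    intro a d hblk hfree hd
    have h0 : cellAt x y grid (a + ((0 : Nat) : Int)) = some "#" := hblk 0 (Nat.succ_pos k)
    simp only [Nat.cast_zero, add_zero] at h0
    simp only [cellAt] at h0
    obtain ⟨row, hrow, hcell⟩ := Option.bind_eq_some_iff.mp h0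
    rw [check_ahead, dif_neg (by omega : ¬ d ≥ 4)]
    simp only [dirs_symAt a, hrow, hcell, ne_eq, not_true_eq_false, if_false,
      heh_symAt a, hah_mod_succ a]
    have hstep : ∀ j : Nat, j < k → cellAt x y grid ((a + 1) + j) = some "#" := by
      intro j hj
      have := hblk (j + 1) (by omega)
      rw [show a + ((j + 1 : Nat) : Int) = (a + 1) + j by push_cast; ring] at this
      exact this
    have hfree' : (cellAt x y grid ((a + 1) + k)).getD "#" ≠ "#" := by
      rw [show (a + 1) + (k : Int) = a + ((k + 1 : Nat) : Int) by push_cast; ring]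
      exact hfree
    rw [ih (a + 1) (d + 1) hstep hfree' (by push_cast at hd ⊢; omega),
      show (a + 1) + (k : Int) = a + ((k + 1 : Nat) : Int) by push_cast; ring]

-- B-side characterization of the loop
lemma altGo_eval (x y : Int) (grid : List (List String)) :
    ∀ (k : Nat) (i m n : Int),
      (∀ j : Nat, j < k → cellAt x y grid (i + m + j) = some "#") →
      (cellAt x y grid (i + m + k)).getD "#" ≠ "#" →
      m + (k : Int) < n →
      altGo x y grid i m n =
        (symAt (i + m + k), (deltaDir (i + m + k)).1, (deltaDir (i + m + k)).2) := by
  intro k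
  induction k with
  | zero =>
    intro i m n _ hfree hn
    simp only [Nat.cast_zero, add_zero] at hfree ⊢
    obtain ⟨c, hc, hne⟩ := opt_free hfree
    simp only [cellAt] at hc
    obtain ⟨row, hrow, hcell⟩ := Option.bind_eq_some_iff.mp hc
    rw [altGo, dif_neg (by omega : ¬ m ≥ n)]
    simp only [hah_symAt (i + m), dirs_symAt (i + m), hrow, hcell]
    simp [hne]
  | succ k ih =>
    intro i m n hblk hfree hn
    have h0 : cellAt x y grid (i + m + ((0 : Nat) : Int)) = some "#" := hblk 0 (Nat.succ_pos k)
    simp only [Nat.cast_zero, add_zero] at h0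
    simp only [cellAt] at h0
    obtain ⟨row, hrow, hcell⟩ := Option.bind_eq_some_iff.mp h0
    rw [altGo, dif_neg (by omega : ¬ m ≥ n)]
    simp only [hah_symAt (i + m), dirs_symAt (i + m), hrow, hcell, ne_eq,
      not_true_eq_false, if_false]
    have hstep : ∀ j : Nat, j < k → cellAt x y grid (i + (m + 1) + j) = some "#" := by
      intro j hj
      have := hblk (j + 1) (by omega)
      rw [show i + m + ((j + 1 : Nat) : Int) = i + (m + 1) + j by push_cast; ring] at this
      exact this
    have hfree' : (cellAt x y grid (i + (m + 1) + k)).getD "#" ≠ "#" := by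
      rw [show i + (m + 1) + (k : Int) = i + m + ((k + 1 : Nat) : Int) by push_cast; ring]
      exact hfree
    rw [ih i (m + 1) n hstep hfree' (by push_cast at hn ⊢; omega),
      show i + (m + 1) + (k : Int) = i + m + ((k + 1 : Nat) : Int) by push_cast; ring]

-- ===== VERDICT (by name: the statement is the Claim_ definition above) =====
theorem check_ahead_spec : Claim_equal_check_ahead := by
  intro x y grid symbol d _ hpre
  obtain ⟨hmem, k, hk4, hd, hblk, hfree⟩ := hpre
  unfold Spec_check_ahead
  have hsym : symAt (hehIdx symbol) = symbol := symAt_of_mem symbol hmem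
  have hA := checkA_eval x y grid k (hehIdx symbol) d hblk hfree hd
  rw [hsym] at hA
  have hB := altGo_eval x y grid k (hehIdx symbol) 0 (4 - d)
    (by intro j hj; rw [show hehIdx symbol + 0 + (j : Int) = hehIdx symbol + j by ring]; exact hblk j hj)
    (by rw [show hehIdx symbol + 0 + (k : Int) = hehIdx symbol + k by ring]; exact hfree)
    (by omega)
  rw [show hehIdx symbol + 0 + (k : Int) = hehIdx symbol + k by ring] at hB
  have hheh : hehD.get? symbol = some (hehIdx symbol) := by
    fin_cases hmem <;> decide
  simp only [check_ahead_alt, hheh]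
  rw [hA, hB]
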